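-- pv_equiv track=rewrite | github.com/artefactory/nautilus-connectors-kit | lib/utils/text.py | add_column_value_to_csv_line_iterator
-- ===== SOURCE A (Python) =====
-- def add_column_value_to_csv_line_iterator(line_iterator, columname, value):
--     first_line = True
--     for line in line_iterator:
--         if line == '':
--             break
--         if first_line:
--             first_line = False
--             if columname in line.split(','):
--                 raise Exception('Column {} already present'.format(columname))
--             yield line + ',' + columname
--         else:
--             yield line + ',' + value
-- ===== SOURCE B (Python) =====
-- def add_column_value_to_csv_line_iterator(line_iterator, columname, value):
--     # Collect-then-transform: truncate at first empty line via index/slice,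
--     # handle the header separately, map the rest.
--     lines = list(line_iterator)
--     try:
--         lines = lines[:lines.index('')]
--     except ValueError:
--         pass
--     if not lines:
--         return []
--     header, rest = lines[0], lines[1:]
--     if columname in header.split(','):
--         raise Exception('Column {} already present'.format(columname))
--     return [header + ',' + columname] + [l + ',' + value for l in rest]
-- ===== Notes on version B (the rewrite author's own statement) =====
-- stated objective: alternative
-- what changed: Replaces the flagged single-pass generator loop with a collect-then-transform pipeline: truncate at the first empty line via index/slice, treat the header separately, and map the remaining lines with a comprehension.
import Mathlib
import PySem

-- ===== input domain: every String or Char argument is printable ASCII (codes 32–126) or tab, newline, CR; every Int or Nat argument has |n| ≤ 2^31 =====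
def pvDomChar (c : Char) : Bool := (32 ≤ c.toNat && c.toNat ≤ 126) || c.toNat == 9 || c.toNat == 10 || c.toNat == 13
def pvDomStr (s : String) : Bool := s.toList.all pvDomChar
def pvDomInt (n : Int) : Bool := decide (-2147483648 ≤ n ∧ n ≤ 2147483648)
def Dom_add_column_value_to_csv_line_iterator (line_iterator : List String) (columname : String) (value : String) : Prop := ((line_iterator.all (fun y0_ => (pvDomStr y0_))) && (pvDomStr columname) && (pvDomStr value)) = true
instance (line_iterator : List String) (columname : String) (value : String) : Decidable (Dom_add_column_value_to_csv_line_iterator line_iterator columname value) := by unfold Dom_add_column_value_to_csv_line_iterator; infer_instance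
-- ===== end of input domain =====

-- B replaces A's flagged generator loop by truncate-at-first-empty-line (index/slice),
-- a separate header step, and a map over the rest; same cost, different decomposition.


-- ===== PORT A =====
-- the generator loop with its first_line flag; the `raise` branch is excluded by Pre_
def pvAGo (columname value : String) : List String → Bool → List String
  | [], _ => []
  | line :: rest, firstLine =>
    if line = "" then []
    else if firstLine then
      if columname ∈ (PySem.Str.split? line ",").getD [] then []  -- Source A raises Exception here; excluded by Pre_
      else (line ++ "," ++ columname) :: pvAGo columname value rest false
    else (line ++ "," ++ value) :: pvAGo columname value rest false

def add_column_value_to_csv_line_iterator (line_iterator : List String) (columname : String) (value : String) : List String :=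
  pvAGo columname value line_iterator true

-- ===== PORT B =====
def add_column_value_to_csv_line_iterator_alt (line_iterator : List String) (columname : String) (value : String) : List String :=
  let lines :=
    match PySem.List.index? line_iterator "" with      -- lines.index('')
    | some i => PySem.List.slice line_iterator none (some (i : Int))  -- lines[:i]
    | none => line_iterator                            -- ValueError: keep lines
  match lines with
  | [] => []
  | header :: rest =>
    if columname ∈ (PySem.Str.split? header ",").getD [] then []  -- Source B raises Exception here; excluded by Pre_
    else (header ++ "," ++ columname) :: rest.map (fun l => l ++ "," ++ value)

-- ===== PRECONDITION & SPEC =====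
-- Pre_ excludes exactly the inputs where both Pythons raise Exception('Column … already present'):
-- a non-empty first line whose comma-split fields contain columname.
def Pre_add_column_value_to_csv_line_iterator (line_iterator : List String) (columname : String) (value : String) : Prop :=
  (match line_iterator with
   | [] => true
   | h :: _ => h == "" || !(((PySem.Str.split? h ",").getD []).contains columname)) = true
instance (line_iterator : List String) (columname : String) (value : String) : Decidable (Pre_add_column_value_to_csv_line_iterator line_iterator columname value) := by unfold Pre_add_column_value_to_csv_line_iterator; infer_instance

def pvWitness_add_column_value_to_csv_line_iterator : List String × String × String := (["a,b", "1,2", "", "x"], "c", "0")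

def Spec_add_column_value_to_csv_line_iterator (line_iterator : List String) (columname : String) (value : String) (out : List String) : Prop := out = add_column_value_to_csv_line_iterator_alt line_iterator columname value
instance (line_iterator : List String) (columname : String) (value : String) (out : List String) : Decidable (Spec_add_column_value_to_csv_line_iterator line_iterator columname value out) := by unfold Spec_add_column_value_to_csv_line_iterator; infer_instance

-- ===== CLAIM (what is proved, stated in full; the proofs are below) =====
def Claim_equal_add_column_value_to_csv_line_iterator : Prop := ∀ (line_iterator : List String) (columname : String) (value : String), Dom_add_column_value_to_csv_line_iterator line_iterator columname value → Pre_add_column_value_to_csv_line_iterator line_iterator columname value → Spec_add_column_value_to_csv_line_iterator line_iterator columname value (add_column_value_to_csv_line_iterator line_iterator columname value)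

-- ===== LEMMAS AND PROOFS =====

-- B's truncation (index of first "" + slice) is takeWhile (· ≠ "")
lemma pv_trunc_eq_takeWhile (li : List String) :
    (match PySem.List.index? li "" with
     | some i => PySem.List.slice li none (some (i : Int))
     | none => li) = li.takeWhile (fun l => l ≠ "") := by
  induction li with
  | nil => simp [PySem.List.index?]
  | cons h t ih =>
    by_cases hh : h = ""
    · subst hh
      rw [PySem.List.index?_cons_self]
      show PySem.List.slice ("" :: t) none (some ((0 : Nat) : Int)) = _
      rw [PySem.List.slice_to_natCast]
      simp [List.takeWhile]
    · rw [PySem.List.index?_cons_of_ne t hh]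
      cases hidx : PySem.List.index? t "" with
      | none =>
        rw [hidx] at ih
        show (h :: t) = _
        rw [List.takeWhile_cons_of_pos (by simp [hh])]
        exact congrArg (h :: ·) ih
      | some i =>
        rw [hidx] at ih
        change PySem.List.slice t none (some (i : Int)) = _ at ih
        show PySem.List.slice (h :: t) none (some ((i : Int) + 1)) = _
        have h1 : ((i : Int) + 1) = ((i + 1 : Nat) : Int) := by push_cast; ring
        rw [h1, PySem.List.slice_to_natCast]
        rw [PySem.List.slice_to_natCast] at ih
        rw [List.take_succ_cons, List.takeWhile_cons_of_pos (by simp [hh]), ih]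

-- A's tail loop maps (· ++ "," ++ value) over the prefix before the first ""
lemma pvAGo_false (columname value : String) (li : List String) :
    pvAGo columname value li false
      = (li.takeWhile (fun l => l ≠ "")).map (fun l => l ++ "," ++ value) := by
  induction li with
  | nil => simp [pvAGo]
  | cons h t ih =>
    by_cases hh : h = ""
    · subst hh; simp [pvAGo, List.takeWhile]
    · simp [pvAGo, hh, List.takeWhile, ih]

-- ===== VERDICT (by name: the statement is the Claim_ definition above) =====
theorem add_column_value_to_csv_line_iterator_spec : Claim_equal_add_column_value_to_csv_line_iterator := by
  intro li c v _ hpre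
  unfold Spec_add_column_value_to_csv_line_iterator
  unfold add_column_value_to_csv_line_iterator add_column_value_to_csv_line_iterator_alt
  rw [pv_trunc_eq_takeWhile]
  cases li with
  | nil => simp [pvAGo]
  | cons h t =>
    unfold Pre_add_column_value_to_csv_line_iterator at hpre
    by_cases hh : h = ""
    · subst hh; simp [pvAGo, List.takeWhile]
    · have hmem : c ∉ (PySem.Str.split? h ",").getD [] := by
        simp [hh] at hpre
        simpa [List.contains_iff_mem] using hpre
      simp [pvAGo, hh, hmem, List.takeWhile, pvAGo_false]
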